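-- pv_equiv track=rewrite | github.com/hadleybcarr/temp | infer_spots.py | max_consecutive_run
-- ===== SOURCE A (Python) =====
-- def max_consecutive_run(frames, gap_tolerance=2):
--     """
--     Longest run of "present" frames, allowing up to `gap_tolerance` consecutive
--     misses before resetting. With sampled-frame data this counts how many
--     consecutive *sampled* frames a cluster appears in.
--     """
--     if not frames:
--         return 0
--     frames = sorted(set(int(f) for f in frames))
--     longest = current = 1
--     for prev, nxt in zip(frames, frames[1:]):
--         if nxt - prev <= gap_tolerance + 1:
--             current += 1
--             longest = max(longest, current)
--         else:
--             current = 1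
--     return longest
-- ===== SOURCE B (Python) =====
-- def _segments(xs, thr):
--     """Split a list into maximal segments whose adjacent differences are <= thr."""
--     segs = []
--     while xs:
--         prev = xs[0]
--         i = 1
--         while i < len(xs) and xs[i] - prev <= thr:
--             prev = xs[i]
--             i += 1
--         segs.append(xs[:i])
--         xs = xs[i:]
--     return segs
--
--
-- def max_consecutive_run(frames, gap_tolerance=2):
--     xs = sorted({int(f) for f in frames})
--     best = 0
--     for seg in _segments(xs, gap_tolerance + 1):
--         if len(seg) > best:
--             best = len(seg)
--     return best
-- ===== Notes on version B (the rewrite author's own statement) =====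
-- stated objective: alternative
-- what changed: Instead of A's single scan carrying a running (longest, current) counter pair, B splits the sorted deduplicated frames into maximal gap-bounded segments as an explicit list-of-segments phase and then takes the maximum segment length.
import Mathlib
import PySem

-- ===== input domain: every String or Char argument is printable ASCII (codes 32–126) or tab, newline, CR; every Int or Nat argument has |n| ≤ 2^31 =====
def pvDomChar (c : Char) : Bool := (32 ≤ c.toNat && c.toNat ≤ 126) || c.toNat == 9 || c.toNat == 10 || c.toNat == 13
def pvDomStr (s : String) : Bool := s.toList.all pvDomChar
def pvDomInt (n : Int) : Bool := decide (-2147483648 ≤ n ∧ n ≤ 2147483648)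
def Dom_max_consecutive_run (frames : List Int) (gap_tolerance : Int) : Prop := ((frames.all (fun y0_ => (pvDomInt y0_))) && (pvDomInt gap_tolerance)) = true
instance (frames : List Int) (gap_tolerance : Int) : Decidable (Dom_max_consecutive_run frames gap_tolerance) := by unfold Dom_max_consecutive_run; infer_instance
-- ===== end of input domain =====

-- B splits the sorted deduplicated list into maximal gap-bounded segments and takes the
-- maximum segment length (objective: alternative decomposition, same O(n log n) cost).

-- ===== PORT A =====
-- A's loop body over zip(frames, frames[1:]) with state (longest, current)
def pvStepA (t : Int) (st : Int × Int) (p : Int × Int) : Int × Int :=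
  if p.2 - p.1 ≤ t then (max st.1 (st.2 + 1), st.2 + 1) else (st.1, 1)

def max_consecutive_run (frames : List Int) (gap_tolerance : Int) : Int :=
  if frames = [] then 0
  else
    let xs := PySem.List.sorted (PySem.Set.ofList frames) (fun x => x) false
    (List.foldl (pvStepA (gap_tolerance + 1)) ((1 : Int), (1 : Int)) (List.zip xs xs.tail)).1

-- ===== PORT B =====
-- inner while loop of _segments: elements continuing the segment after `prev`, and the remainder
def pvTakeSeg (thr prev : Int) : List Int → List Int × List Int
  | [] => ([], [])
  | y :: r =>
      if y - prev ≤ thr then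
        let p := pvTakeSeg thr y r
        (y :: p.1, p.2)
      else ([], y :: r)

theorem pvTakeSeg_rest_le (thr prev : Int) (l : List Int) :
    (pvTakeSeg thr prev l).2.length ≤ l.length := by
  induction l generalizing prev with
  | nil => simp [pvTakeSeg]
  | cons y r ih =>
      simp only [pvTakeSeg]
      split
      · simpa using Nat.le_succ_of_le (ih y)
      · simp

-- outer while loop of _segments
def pvSegments (thr : Int) : List Int → List (List Int)
  | [] => []
  | x :: rest =>
      (x :: (pvTakeSeg thr x rest).1) :: pvSegments thr (pvTakeSeg thr x rest).2
  termination_by l => l.length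
  decreasing_by simpa using Nat.lt_succ_of_le (pvTakeSeg_rest_le thr x rest)

-- B's loop body: keep the larger segment length
def pvStepB (best : Int) (seg : List Int) : Int :=
  if (seg.length : Int) > best then (seg.length : Int) else best

def max_consecutive_run_alt (frames : List Int) (gap_tolerance : Int) : Int :=
  let xs := PySem.List.sorted (PySem.Set.ofList frames) (fun x => x) false
  List.foldl pvStepB 0 (pvSegments (gap_tolerance + 1) xs)

-- ===== PRECONDITION & SPEC =====
def Spec_max_consecutive_run (frames : List Int) (gap_tolerance : Int) (out : Int) : Prop := out = max_consecutive_run_alt frames gap_tolerance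
instance (frames : List Int) (gap_tolerance : Int) (out : Int) : Decidable (Spec_max_consecutive_run frames gap_tolerance out) := by unfold Spec_max_consecutive_run; infer_instance

-- ===== CLAIM (what is proved, stated in full; the proofs are below) =====
def Claim_equal_max_consecutive_run : Prop := ∀ (frames : List Int) (gap_tolerance : Int), Dom_max_consecutive_run frames gap_tolerance → Spec_max_consecutive_run frames gap_tolerance (max_consecutive_run frames gap_tolerance)

-- ===== LEMMAS AND PROOFS =====

-- maximum segment length (proof-side characterisation of B's final fold)
def pvMaxLen : List (List Int) → Int
  | [] => 0
  | s :: ss => max ((s.length : Int)) (pvMaxLen ss)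

theorem pvMaxLen_nonneg (segs : List (List Int)) : 0 ≤ pvMaxLen segs := by
  induction segs with
  | nil => simp [pvMaxLen]
  | cons s ss ih => simp only [pvMaxLen]; positivity

theorem pvStepB_eq_max (b : Int) (s : List Int) : pvStepB b s = max b (s.length : Int) := by
  unfold pvStepB; split_ifs <;> omega

theorem foldB_eq_max (segs : List (List Int)) : ∀ b : Int, 0 ≤ b →
    List.foldl pvStepB b segs = max b (pvMaxLen segs) := by
  induction segs with
  | nil => intro b hb; simp [List.foldl, pvMaxLen]; omega
  | cons s ss ih =>
      intro b hb
      simp only [List.foldl, pvMaxLen]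
      rw [ih (pvStepB b s) (by rw [pvStepB_eq_max]; positivity), pvStepB_eq_max]
      have h1 : (0 : Int) ≤ (s.length : Int) := by positivity
      have h2 := pvMaxLen_nonneg ss
      omega

theorem main_inv (t : Int) (xs : List Int) : ∀ prev l c : Int, 1 ≤ c → c ≤ l →
    (List.foldl (pvStepA t) (l, c) (List.zip (prev :: xs) xs)).1
      = max l (max (c + ((pvTakeSeg t prev xs).1.length : Int))
                   (pvMaxLen (pvSegments t (pvTakeSeg t prev xs).2))) := by
  induction xs with
  | nil =>
      intro prev l c h1 h2
      simp [pvTakeSeg, pvSegments, pvMaxLen]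
      omega
  | cons y r ih =>
      intro prev l c h1 h2
      rw [List.zip_cons_cons]
      simp only [List.foldl]
      by_cases h : y - prev ≤ t
      · rw [show pvTakeSeg t prev (y :: r)
              = (y :: (pvTakeSeg t y r).1, (pvTakeSeg t y r).2) from by
            rw [pvTakeSeg]; simp [h]]
        rw [show pvStepA t (l, c) (prev, y) = (max l (c + 1), c + 1) from by
          simp [pvStepA, h]]
        rw [ih y (max l (c + 1)) (c + 1) (by omega) (by omega)]
        simp only [List.length_cons]
        push_cast
        omega
      · rw [show pvTakeSeg t prev (y :: r) = ([], y :: r) from by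
            rw [pvTakeSeg]; simp [h]]
        rw [show pvStepA t (l, c) (prev, y) = (l, 1) from by simp [pvStepA, h]]
        rw [ih y l 1 (by omega) (by omega)]
        rw [show pvSegments t (y :: r)
              = (y :: (pvTakeSeg t y r).1) :: pvSegments t (pvTakeSeg t y r).2 from by
            rw [pvSegments]]
        simp only [pvMaxLen, List.length_cons, List.length_nil]
        have hF := pvMaxLen_nonneg (pvSegments t (pvTakeSeg t y r).2)
        push_cast
        omega

-- ===== VERDICT (by name: the statement is the Claim_ definition above) =====
theorem max_consecutive_run_spec : Claim_equal_max_consecutive_run := by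
  intro frames gap_tolerance _
  unfold Spec_max_consecutive_run max_consecutive_run max_consecutive_run_alt
  by_cases hf : frames = []
  · subst hf
    simp [PySem.Set.ofList, PySem.List.sorted, pvSegments]
  · rw [if_neg hf]
    obtain ⟨f, fs, hfr⟩ := List.exists_cons_of_ne_nil hf
    have hmem : f ∈ PySem.List.sorted (PySem.Set.ofList frames) (fun x => x) false := by
      rw [PySem.List.mem_sorted, PySem.Set.mem_ofList]
      simp [hfr]
    have hne : PySem.List.sorted (PySem.Set.ofList frames) (fun x => x) false ≠ [] := by
      intro h; rw [h] at hmem; exact (List.not_mem_nil) hmem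
    obtain ⟨x, rest, hxs⟩ := List.exists_cons_of_ne_nil hne
    simp only [hxs, List.tail_cons]
    rw [main_inv (gap_tolerance + 1) rest x 1 1 le_rfl le_rfl]
    rw [show pvSegments (gap_tolerance + 1) (x :: rest)
          = (x :: (pvTakeSeg (gap_tolerance + 1) x rest).1)
              :: pvSegments (gap_tolerance + 1) (pvTakeSeg (gap_tolerance + 1) x rest).2 from by
        rw [pvSegments]]
    rw [foldB_eq_max _ 0 le_rfl]
    simp only [pvMaxLen, List.length_cons]
    have hF := pvMaxLen_nonneg
      (pvSegments (gap_tolerance + 1) (pvTakeSeg (gap_tolerance + 1) x rest).2)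
    push_cast
    omega
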